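-- pv_equiv track=rewrite | github.com/trongminh108/1000-exercises | Chapter_1/BT53.py | BT53_Show
-- ===== SOURCE A (Python) =====
-- def BT53_Show(n):
--     maxn = n % 10
--     n //= 10
--     count = 1
--     while n > 0:
--         temp = n % 10
--         if maxn < temp:
--             maxn = temp
--             count = 1
--         elif maxn == temp:
--             count += 1
--         n //= 10
--     return count
-- ===== SOURCE B (Python) =====
-- def BT53_Show(n):
--     digits = [n % 10]
--     m = n // 10
--     while m > 0:
--         digits.append(m % 10)
--         m //= 10
--     return digits.count(max(digits))
-- ===== Notes on version B (the rewrite author's own statement) =====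
-- stated objective: alternative
-- what changed: B materialises the digit list once and then computes the answer as digits.count(max(digits)) in two passes, instead of A's single online sweep that tracks the running maximum and resets a counter.
import Mathlib
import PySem

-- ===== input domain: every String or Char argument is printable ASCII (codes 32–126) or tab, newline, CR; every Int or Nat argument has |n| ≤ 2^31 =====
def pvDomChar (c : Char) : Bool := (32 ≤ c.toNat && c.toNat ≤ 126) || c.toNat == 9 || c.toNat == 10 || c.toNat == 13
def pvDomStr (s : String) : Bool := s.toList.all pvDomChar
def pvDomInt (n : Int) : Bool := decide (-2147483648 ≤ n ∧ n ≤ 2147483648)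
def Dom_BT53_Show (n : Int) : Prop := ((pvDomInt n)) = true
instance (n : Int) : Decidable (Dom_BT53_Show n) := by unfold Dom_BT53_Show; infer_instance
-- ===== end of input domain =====

-- B builds the digit list once and returns digits.count(max(digits)) in two passes,
-- instead of A's online sweep with a running maximum and a reset counter (objective: alternative).

-- termination helper for both while-loops: n // 10 shrinks for n > 0
theorem pvDiv10_toNat_lt (m : Int) (h : m > 0) :
    (PySem.Int.floordiv m 10).toNat < m.toNat := by
  rw [PySem.Int.floordiv_eq_ediv_of_pos (by omega)]
  have h1 : 0 ≤ m / 10 := Int.ediv_nonneg (by omega) (by omega)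
  have h2 : m / 10 < m := by
    have := Int.ediv_le_self 10 (a := m) (by omega)
    rcases lt_or_eq_of_le this with h2 | h2
    · exact h2
    · exfalso; omega
  omega

-- ===== PORT A =====
def pvLoopA (m maxn count : Int) : Int :=
  if h : m > 0 then
    let temp := PySem.Int.mod m 10
    if maxn < temp then pvLoopA (PySem.Int.floordiv m 10) temp 1
    else if maxn = temp then pvLoopA (PySem.Int.floordiv m 10) maxn (count + 1)
    else pvLoopA (PySem.Int.floordiv m 10) maxn count
  else count
termination_by m.toNat
decreasing_by all_goals exact pvDiv10_toNat_lt m h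

def BT53_Show (n : Int) : Int :=
  pvLoopA (PySem.Int.floordiv n 10) (PySem.Int.mod n 10) 1

-- ===== PORT B =====
def pvLoopB (m : Int) (digits : List Int) : List Int :=
  if h : m > 0 then
    pvLoopB (PySem.Int.floordiv m 10) (digits ++ [PySem.Int.mod m 10])
  else digits
termination_by m.toNat
decreasing_by exact pvDiv10_toNat_lt m h

def BT53_Show_alt (n : Int) : Int :=
  let digits := pvLoopB (PySem.Int.floordiv n 10) [PySem.Int.mod n 10]
  match PySem.List.max? digits (fun x => x) with
  | some mx => (PySem.List.count digits mx : Int)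
  | none => 0

-- ===== PRECONDITION & SPEC =====
def Spec_BT53_Show (n : Int) (out : Int) : Prop := out = BT53_Show_alt n
instance (n : Int) (out : Int) : Decidable (Spec_BT53_Show n out) := by unfold Spec_BT53_Show; infer_instance

-- ===== CLAIM (what is proved, stated in full; the proofs are below) =====
def Claim_equal_BT53_Show : Prop := ∀ (n : Int), Dom_BT53_Show n → Spec_BT53_Show n (BT53_Show n)

-- ===== LEMMAS AND PROOFS =====

theorem pv_mem_le_foldl_max (a x : Int) (t : List Int) (hx : x ∈ a :: t) :
    x ≤ t.foldl max a := by
  have h := PySem.List.max?_isMax (xs := a :: t) (key := fun y => y)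
    (m := t.foldl max a) (PySem.List.max?_id_cons a t)
  exact h x hx

theorem pv_foldl_max_append (a temp : Int) (t : List Int) :
    (t ++ [temp]).foldl max a = max (t.foldl max a) temp := by
  simp [List.foldl_append]

-- invariant connecting A's online sweep to B's materialised list
theorem pv_inv (m a : Int) (t : List Int) :
    pvLoopA m (t.foldl max a) (((a :: t).count (t.foldl max a) : Nat) : Int)
      = match PySem.List.max? (pvLoopB m (a :: t)) (fun x => x) with
        | some mx => (PySem.List.count (pvLoopB m (a :: t)) mx : Int)
        | none => 0 := by
  by_cases h : m > 0
  · rw [pvLoopA, pvLoopB]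
    simp only [h, dif_pos]
    set temp := PySem.Int.mod m 10 with htemp
    by_cases hlt : t.foldl max a < temp
    · -- new strict maximum: count resets to 1
      rw [if_pos hlt]
      have hkey := pv_inv (PySem.Int.floordiv m 10) a (t ++ [temp])
      have hmax : (t ++ [temp]).foldl max a = temp := by
        rw [pv_foldl_max_append]; omega
      have hnotmem : temp ∉ a :: t := fun hmem =>
        absurd (pv_mem_le_foldl_max a temp t hmem) (by omega)
      have hcount : (a :: (t ++ [temp])).count temp = 1 := by
        have : (a :: (t ++ [temp])) = (a :: t) ++ [temp] := by simp
        rw [this, List.count_append, List.count_eq_zero.mpr hnotmem]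
        simp
      rw [hmax, hcount] at hkey
      have hl : a :: (t ++ [temp]) = (a :: t) ++ [temp] := by simp
      rw [hl] at hkey
      exact_mod_cast hkey
    · by_cases heq : t.foldl max a = temp
      · -- equal to running maximum: count increments
        rw [if_neg hlt, if_pos heq]
        have hkey := pv_inv (PySem.Int.floordiv m 10) a (t ++ [temp])
        have hmax : (t ++ [temp]).foldl max a = t.foldl max a := by
          rw [pv_foldl_max_append]; omega
        have hcount : (a :: (t ++ [temp])).count (t.foldl max a)
            = (a :: t).count (t.foldl max a) + 1 := by
          have : (a :: (t ++ [temp])) = (a :: t) ++ [temp] := by simp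
          rw [this, List.count_append]
          simp [heq]
        rw [hmax, hcount] at hkey
        have hl : a :: (t ++ [temp]) = (a :: t) ++ [temp] := by simp
        rw [hl] at hkey
        rw [← hkey]
        push_cast
        ring_nf
      · -- strictly smaller digit: nothing changes
        rw [if_neg hlt, if_neg heq]
        have hkey := pv_inv (PySem.Int.floordiv m 10) a (t ++ [temp])
        have hmax : (t ++ [temp]).foldl max a = t.foldl max a := by
          rw [pv_foldl_max_append]; omega
        have hcount : (a :: (t ++ [temp])).count (t.foldl max a)
            = (a :: t).count (t.foldl max a) := by
          have : (a :: (t ++ [temp])) = (a :: t) ++ [temp] := by simp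
          rw [this, List.count_append]
          simp [Ne.symm heq]
        rw [hmax, hcount] at hkey
        have hl : a :: (t ++ [temp]) = (a :: t) ++ [temp] := by simp
        rw [hl] at hkey
        exact hkey
  · rw [pvLoopA, pvLoopB]
    simp only [h, dif_neg, not_false_iff]
    rw [PySem.List.max?_id_cons]
    simp [PySem.List.count]
termination_by m.toNat
decreasing_by all_goals exact pvDiv10_toNat_lt m h

-- ===== VERDICT (by name: the statement is the Claim_ definition above) =====
theorem BT53_Show_spec : Claim_equal_BT53_Show := by
  intro n _
  unfold Spec_BT53_Show BT53_Show BT53_Show_alt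
  have := pv_inv (PySem.Int.floordiv n 10) (PySem.Int.mod n 10) []
  simpa using this
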